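-- pv_equiv track=rewrite | github.com/Ikhtiyor-s/nonbor-buyurtmalarbot | bot/callback_handler.py | pair_buttons
-- ===== SOURCE A (Python) =====
-- def pair_buttons(buttons):
--     """Tugmalar ro'yxatini 2 tadan juftlab qatorlarga joylashtirish"""
--     rows = []
--     for i in range(0, len(buttons), 2):
--         if i + 1 < len(buttons):
--             rows.append([buttons[i], buttons[i + 1]])
--         else:
--             rows.append([buttons[i]])
--     return rows
-- ===== SOURCE B (Python) =====
-- def pair_buttons(buttons):
--     """Tugmalar ro'yxatini 2 tadan juftlab qatorlarga joylashtirish"""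
--     rows = [[a, b] for a, b in zip(buttons[::2], buttons[1::2])]
--     if len(buttons) % 2:
--         rows.append([buttons[-1]])
--     return rows
-- ===== Notes on version B (the rewrite author's own statement) =====
-- stated objective: idiomatic
-- what changed: pairs the items by zipping the even-index and odd-index strided slices (appending the leftover singleton when the length is odd) instead of stepping an index by two with a look-ahead branch
import Mathlib
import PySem

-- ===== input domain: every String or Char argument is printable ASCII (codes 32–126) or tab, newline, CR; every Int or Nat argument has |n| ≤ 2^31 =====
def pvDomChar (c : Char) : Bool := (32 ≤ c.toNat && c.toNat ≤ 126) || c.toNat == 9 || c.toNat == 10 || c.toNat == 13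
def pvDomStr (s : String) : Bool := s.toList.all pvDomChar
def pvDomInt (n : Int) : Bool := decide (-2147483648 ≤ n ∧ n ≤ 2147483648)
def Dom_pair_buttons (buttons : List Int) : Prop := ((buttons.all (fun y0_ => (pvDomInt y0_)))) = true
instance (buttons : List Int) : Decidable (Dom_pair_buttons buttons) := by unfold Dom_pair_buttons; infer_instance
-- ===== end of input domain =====

-- B groups the list into rows of two by zipping the even-index and odd-index strided
-- slices (plus the leftover singleton for odd length) instead of an index loop with
-- look-ahead; objective: more idiomatic, same O(n) cost.

-- ===== PORT A =====
def pair_buttons (buttons : List Int) : List (List Int) :=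
  (PySem.List.pyRange 0 (buttons.length : Int) 2).foldl
    (fun rows i =>
      if i + 1 < (buttons.length : Int) then
        rows ++ [[PySem.List.pyGetD buttons i 0, PySem.List.pyGetD buttons (i + 1) 0]]
      else
        rows ++ [[PySem.List.pyGetD buttons i 0]]) []

-- ===== PORT B =====
def pair_buttons_alt (buttons : List Int) : List (List Int) :=
  let evens := (PySem.List.slice? buttons none none 2).getD []      -- buttons[::2]
  let odds  := (PySem.List.slice? buttons (some 1) none 2).getD []  -- buttons[1::2]
  let rows  := (evens.zip odds).map (fun p => [p.1, p.2])
  if (buttons.length : Int) % 2 ≠ 0 then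
    rows ++ [[(PySem.List.pyGet? buttons (-1)).getD 0]]             -- buttons[-1] (list nonempty here)
  else
    rows

-- ===== PRECONDITION & SPEC =====
def Spec_pair_buttons (buttons : List Int) (out : List (List Int)) : Prop := out = pair_buttons_alt buttons
instance (buttons : List Int) (out : List (List Int)) : Decidable (Spec_pair_buttons buttons out) := by unfold Spec_pair_buttons; infer_instance

-- ===== CLAIM (what is proved, stated in full; the proofs are below) =====
def Claim_equal_pair_buttons : Prop := ∀ (buttons : List Int), Dom_pair_buttons buttons → Spec_pair_buttons buttons (pair_buttons buttons)

-- ===== LEMMAS AND PROOFS =====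

-- Reference form: rows of two, structural two-step recursion.
def pvPairRec : List Int → List (List Int)
  | [] => []
  | [a] => [[a]]
  | a :: b :: t => [a, b] :: pvPairRec t

-- Elements at even indices, two-step recursion.
def pvEvens : List Int → List Int
  | [] => []
  | [a] => [a]
  | a :: _ :: t => a :: pvEvens t

theorem pvEvens_cons_tail (x : Int) (t : List Int) :
    pvEvens (x :: t) = x :: pvEvens t.tail := by
  cases t <;> simp [pvEvens]

theorem pvRangeTwo (n : Nat) :
    PySem.List.pyRange 0 (n : Int) 2 =
      (List.range ((n + 1) / 2)).map (fun k => ((2 * k : Nat) : Int)) := by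
  rw [PySem.List.pyRange_of_pos 0 (n : Int) (by norm_num)]
  have hc : (if (0:Int) < (n:Int) then (((n:Int) - 0 + 2 - 1) / 2).toNat else 0) = (n + 1) / 2 := by
    split
    · have : ((n:Int) - 0 + 2 - 1) = ((n + 1 : Nat) : Int) := by push_cast; ring
      rw [this, show ((2:Int)) = ((2:Nat):Int) from rfl, ← Int.natCast_div, Int.toNat_natCast]
    · omega
  rw [hc]
  apply List.map_congr_left
  intro k _
  push_cast
  ring

theorem pvFilterMapEvens (xs : List Int) :
    (List.range ((xs.length + 1) / 2)).filterMap (fun k => xs[2 * k]?) = pvEvens xs := by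
  induction xs using pvEvens.induct with
  | case1 => simp [pvEvens]
  | case2 a => simp [pvEvens]
  | case3 a b t ih =>
      have hlen : (((a :: b :: t).length + 1) / 2) = ((t.length + 1) / 2) + 1 := by
        simp; omega
      rw [hlen, List.range_succ_eq_map, List.filterMap_cons, List.filterMap_map]
      simp only [Function.comp]
      have hshift : ∀ k : Nat, (a :: b :: t)[2 * (k + 1)]? = t[2 * k]? := by
        intro k
        rw [show 2 * (k + 1) = (2 * k + 1) + 1 by ring]
        simp
      simp only [hshift]
      simp [pvEvens, ih]

theorem pvSliceEvens (xs : List Int) :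
    PySem.List.slice? xs none none 2 = some (pvEvens xs) := by
  simp only [PySem.List.slice?, PySem.List.sliceIndices]
  norm_num
  rw [show (if 0 < xs.length then (((xs.length:Int) + 2 - 1) / 2).toNat else 0)
        = (xs.length + 1) / 2 by
      split
      · have h2 : ((xs.length:Int) + 2 - 1) = ((xs.length + 1 : Nat) : Int) := by push_cast; ring
        rw [h2, show ((2:Int)) = ((2:Nat):Int) from rfl, ← Int.natCast_div, Int.toNat_natCast]
      · omega]
  rw [show (fun k : Nat => xs[((2:Int) * (k:Int)).toNat]?) = (fun k : Nat => xs[2 * k]?) by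
      funext k; congr 1]
  exact pvFilterMapEvens xs

theorem pvSliceOdds (xs : List Int) :
    PySem.List.slice? xs (some 1) none 2 = some (pvEvens xs.tail) := by
  cases xs with
  | nil => simp [PySem.List.slice?, PySem.List.sliceIndices, pvEvens]
  | cons a t =>
      simp only [PySem.List.slice?, PySem.List.sliceIndices]
      norm_num
      rw [show (if 0 < t.length then (((t.length:Int) + 2 - 1) / 2).toNat else 0)
            = (t.length + 1) / 2 by
          split
          · have h2 : ((t.length:Int) + 2 - 1) = ((t.length + 1 : Nat) : Int) := by
              push_cast; ring
            rw [h2, show ((2:Int)) = ((2:Nat):Int) from rfl, ← Int.natCast_div, Int.toNat_natCast]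
          · omega]
      rw [show (fun k : Nat => (a :: t)[((1:Int) + 2 * (k:Int)).toNat]?)
            = (fun k : Nat => t[2 * k]?) by
          funext k
          rw [show ((1:Int) + 2 * (k:Int)).toNat = (2 * k) + 1 by omega]
          simp]
      exact pvFilterMapEvens t

-- B equals the reference form.
theorem pvAlt_eq_pairRec (xs : List Int) : pair_buttons_alt xs = pvPairRec xs := by
  induction xs using pvPairRec.induct with
  | case1 => simp [pair_buttons_alt, pvPairRec, PySem.List.slice?, PySem.List.sliceIndices]
  | case2 a =>
      simp [pair_buttons_alt, pvPairRec, pvSliceEvens, pvSliceOdds, pvEvens,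
        PySem.List.pyGet?_neg_one]
  | case3 a b t ih =>
      have hlast : PySem.List.pyGet? (a :: b :: t) (-1) = PySem.List.pyGet? t (-1) ∨ t = [] := by
        cases t with
        | nil => right; rfl
        | cons c u =>
            left
            rw [PySem.List.pyGet?_neg_one, PySem.List.pyGet?_neg_one]
            simp [List.getLast?_cons]
      simp only [pair_buttons_alt, pvSliceEvens, pvSliceOdds, Option.getD_some] at ih ⊢
      simp only [List.tail_cons]
      rw [show pvEvens (a :: b :: t) = a :: pvEvens t from rfl, pvEvens_cons_tail b t]
      simp only [List.zip_cons_cons, List.map_cons]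
      have hmod : ((((a :: b :: t).length : Int)) % 2 ≠ 0) ↔ (((t.length : Int)) % 2 ≠ 0) := by
        simp; omega
      rcases hlast with h | h
      · rw [pvPairRec]
        rw [← ih]
        by_cases hodd : ((t.length : Int)) % 2 ≠ 0
        · rw [if_pos (hmod.mpr hodd), if_pos hodd, h]
          simp
        · rw [if_neg (fun hc => hodd (hmod.mp hc)), if_neg hodd]
      · subst h
        simp [pvPairRec, pvEvens]

-- A in flatMap form over the two-stepped range, then equal to the reference form.
theorem pvA_eq_pairRec (xs : List Int) : pair_buttons xs = pvPairRec xs := by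
  have hbody : ∀ (n : Nat) (ys : List Int),
      (fun (rows : List (List Int)) (i : Int) =>
        if i + 1 < (n : Int) then
          rows ++ [[PySem.List.pyGetD ys i 0, PySem.List.pyGetD ys (i + 1) 0]]
        else
          rows ++ [[PySem.List.pyGetD ys i 0]])
      = (fun rows i => rows ++
          (if i + 1 < (n : Int) then
            [[PySem.List.pyGetD ys i 0, PySem.List.pyGetD ys (i + 1) 0]]
          else
            [[PySem.List.pyGetD ys i 0]])) := by
    intro n ys; funext rows i; split <;> rfl
  unfold pair_buttons
  rw [hbody xs.length xs, PySem.List.foldl_append_eq_flatMap, List.nil_append,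
    pvRangeTwo xs.length, List.flatMap_map]
  induction xs using pvPairRec.induct with
  | case1 => simp [pvPairRec]
  | case2 a => simp [pvPairRec]
  | case3 a b t ih =>
      have hlen : (((a :: b :: t).length + 1) / 2) = ((t.length + 1) / 2) + 1 := by
        simp; omega
      rw [hlen, List.range_succ_eq_map, List.flatMap_cons, List.flatMap_map]
      have h0 : ((2 * 0 : Nat) : Int) + 1 < ((a :: b :: t).length : Int) := by
        simp
      rw [if_pos h0]
      have hshift : ∀ k : Nat,
          (if ((2 * (k + 1) : Nat) : Int) + 1 < ((a :: b :: t).length : Int) then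
            [[PySem.List.pyGetD (a :: b :: t) ((2 * (k + 1) : Nat) : Int) 0,
              PySem.List.pyGetD (a :: b :: t) (((2 * (k + 1) : Nat) : Int) + 1) 0]]
          else
            [[PySem.List.pyGetD (a :: b :: t) ((2 * (k + 1) : Nat) : Int) 0]])
          = (if ((2 * k : Nat) : Int) + 1 < ((t.length : Int)) then
              [[PySem.List.pyGetD t ((2 * k : Nat) : Int) 0,
                PySem.List.pyGetD t (((2 * k : Nat) : Int) + 1) 0]]
            else
              [[PySem.List.pyGetD t ((2 * k : Nat) : Int) 0]]) := by
        intro k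
        have hc : (((2 * (k + 1) : Nat) : Int) + 1 < ((a :: b :: t).length : Int))
            ↔ (((2 * k : Nat) : Int) + 1 < ((t.length : Int))) := by
          simp; omega
        have hg1 : PySem.List.pyGetD (a :: b :: t) ((2 * (k + 1) : Nat) : Int) 0
            = PySem.List.pyGetD t ((2 * k : Nat) : Int) 0 := by
          rw [PySem.List.pyGetD_natCast, PySem.List.pyGetD_natCast,
            show 2 * (k + 1) = (2 * k + 1) + 1 by ring]
          rfl
        have hg2 : PySem.List.pyGetD (a :: b :: t) (((2 * (k + 1) : Nat) : Int) + 1) 0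
            = PySem.List.pyGetD t (((2 * k : Nat) : Int) + 1) 0 := by
          rw [show (((2 * (k + 1) : Nat) : Int) + 1) = (((2 * (k + 1) + 1 : Nat)) : Int) by push_cast; ring,
            show (((2 * k : Nat) : Int) + 1) = (((2 * k + 1 : Nat)) : Int) by push_cast; ring,
            PySem.List.pyGetD_natCast, PySem.List.pyGetD_natCast,
            show 2 * (k + 1) + 1 = (2 * k + 1 + 1) + 1 by ring]
          rfl
        rw [hg1, hg2]
        by_cases h : ((2 * k : Nat) : Int) + 1 < ((t.length : Int))
        · rw [if_pos (hc.mpr h), if_pos h]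
        · rw [if_neg (fun hcc => h (hc.mp hcc)), if_neg h]
      simp only [hshift]
      rw [pvPairRec, ← ih]
      have ha : PySem.List.pyGetD (a :: b :: t) ((2 * 0 : Nat) : Int) 0 = a := by
        norm_num
      have hb : PySem.List.pyGetD (a :: b :: t) (((2 * 0 : Nat) : Int) + 1) 0 = b := by
        rw [show (((2 * 0 : Nat) : Int) + 1) = ((1 : Nat) : Int) by norm_num,
          PySem.List.pyGetD_natCast]
        rfl
      rw [ha, hb]
      simp

-- ===== VERDICT (by name: the statement is the Claim_ definition above) =====
theorem pair_buttons_spec : Claim_equal_pair_buttons := by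
  intro buttons _
  unfold Spec_pair_buttons
  rw [pvA_eq_pairRec, pvAlt_eq_pairRec]
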